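-- pv_equiv track=rewrite | github.com/developer-shkim/algorithm | beakjoon/brute_force/b_2839.py | get_package_count
-- ===== SOURCE A (Python) =====
-- def get_package_count(suger):
--     if suger % 5 == 0:
--         return suger // 5
--
--     if (suger % 5) % 3 == 0:
--         return suger // 5 + (suger % 5) // 3
--
--     remained_suger = suger
--     while remained_suger >= 0:
--         if remained_suger % 5 == 0:
--             return (suger - remained_suger) // 3 + remained_suger // 5
--         remained_suger -= 3
--
--     return -1
-- ===== SOURCE B (Python) =====
-- def get_package_count(suger):
--     r = suger % 5
--     if r == 0:
--         return suger // 5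
--     if r == 3:
--         return suger // 5 + 1
--     # k = number of 3-packages needed to reach a multiple of 5 (3*k == r mod 5)
--     k = 2 if r == 1 else (3 if r == 4 else 4)
--     rem = suger - 3 * k
--     return k + rem // 5 if rem >= 0 else -1
-- ===== Notes on version B (the rewrite author's own statement) =====
-- stated objective: simpler
-- what changed: Replaced A's decrement-and-test while-loop with a straight-line closed-form case analysis on the residue of suger modulo five, using a constant package count per residue.
import Mathlib
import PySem

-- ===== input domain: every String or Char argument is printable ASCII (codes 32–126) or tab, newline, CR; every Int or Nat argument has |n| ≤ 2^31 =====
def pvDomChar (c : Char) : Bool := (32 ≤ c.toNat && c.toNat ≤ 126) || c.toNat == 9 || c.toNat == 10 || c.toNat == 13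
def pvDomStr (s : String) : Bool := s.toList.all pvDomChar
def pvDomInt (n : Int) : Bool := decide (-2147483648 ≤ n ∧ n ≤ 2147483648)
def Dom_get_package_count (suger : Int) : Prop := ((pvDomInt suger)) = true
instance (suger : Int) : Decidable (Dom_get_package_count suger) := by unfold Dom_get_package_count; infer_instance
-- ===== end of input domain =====

-- B replaces A's subtract-and-test loop with a closed-form case analysis on suger % 5 (objective: simpler).

-- ===== PORT A =====
-- the while-loop of A: remained -= 3 until a non-negative multiple of 5 is hit or remained < 0
def pyLoopA (suger remained : Int) : Int :=
  if _h : remained ≥ 0 then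
    if PySem.Int.mod remained 5 = 0 then
      PySem.Int.floordiv (suger - remained) 3 + PySem.Int.floordiv remained 5
    else pyLoopA suger (remained - 3)
  else -1
termination_by (remained + 3).toNat
decreasing_by omega

def get_package_count (suger : Int) : Int :=
  if PySem.Int.mod suger 5 = 0 then PySem.Int.floordiv suger 5
  else if PySem.Int.mod (PySem.Int.mod suger 5) 3 = 0 then
    PySem.Int.floordiv suger 5 + PySem.Int.floordiv (PySem.Int.mod suger 5) 3
  else pyLoopA suger suger

-- ===== PORT B =====
def get_package_count_alt (suger : Int) : Int :=
  let r := PySem.Int.mod suger 5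
  if r = 0 then PySem.Int.floordiv suger 5
  else if r = 3 then PySem.Int.floordiv suger 5 + 1
  else
    let k : Int := if r = 1 then 2 else if r = 4 then 3 else 4
    let rem := suger - 3 * k
    if rem ≥ 0 then k + PySem.Int.floordiv rem 5 else -1

-- ===== PRECONDITION & SPEC =====
def Spec_get_package_count (suger : Int) (out : Int) : Prop := out = get_package_count_alt suger
instance (suger : Int) (out : Int) : Decidable (Spec_get_package_count suger out) := by unfold Spec_get_package_count; infer_instance

-- ===== CLAIM (what is proved, stated in full; the proofs are below) =====
def Claim_equal_get_package_count : Prop := ∀ (suger : Int), Dom_get_package_count suger → Spec_get_package_count suger (get_package_count suger)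

-- ===== LEMMAS AND PROOFS =====

-- number of 3's needed to bring a value of residue r (mod 5) onto a multiple of 5
def kk (r : Int) : Int :=
  if r = 0 then 0 else if r = 3 then 1 else if r = 1 then 2 else if r = 4 then 3 else 4

theorem kk_nonneg (r : Int) : 0 ≤ kk r := by
  unfold kk; split_ifs <;> norm_num

theorem pyLoopA_eq (suger remained : Int) :
    pyLoopA suger remained =
      if remained - 3 * kk (remained % 5) ≥ 0 then
        PySem.Int.floordiv (suger - (remained - 3 * kk (remained % 5))) 3 +
          PySem.Int.floordiv (remained - 3 * kk (remained % 5)) 5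
      else -1 := by
  induction remained using pyLoopA.induct with
  | case1 remained h hmod =>
      rw [pyLoopA]
      have h5 : remained % 5 = 0 := by
        rw [PySem.Int.mod_eq_emod_of_pos (by norm_num)] at hmod; exact hmod
      simp only [h, dif_pos, if_pos hmod, h5]
      have hk : kk 0 = 0 := by unfold kk; norm_num
      rw [hk]
      rw [if_pos (by omega : remained - 3 * 0 ≥ 0)]
      norm_num
  | case2 remained h hmod ih =>
      rw [pyLoopA]
      simp only [h, dif_pos, if_neg hmod]
      rw [ih]
      have h5 : remained % 5 ≠ 0 := by
        rw [PySem.Int.mod_eq_emod_of_pos (by norm_num)] at hmod; exact hmod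
      have hb : remained % 5 = 1 ∨ remained % 5 = 2 ∨ remained % 5 = 3 ∨ remained % 5 = 4 := by
        omega
      rcases hb with h1 | h2 | h3 | h4
      · have h35 : (remained - 3) % 5 = 3 := by omega
        rw [h35, h1]; unfold kk; norm_num; ring_nf
        split_ifs <;> first | rfl | omega
      · have h35 : (remained - 3) % 5 = 4 := by omega
        rw [h35, h2]; unfold kk; norm_num; ring_nf
        split_ifs <;> first | rfl | omega
      · have h35 : (remained - 3) % 5 = 0 := by omega
        rw [h35, h3]; unfold kk; norm_num
      · have h35 : (remained - 3) % 5 = 1 := by omega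
        rw [h35, h4]; unfold kk; norm_num; ring_nf
        split_ifs <;> first | rfl | omega
  | case3 remained h =>
      rw [pyLoopA]
      have hk := kk_nonneg (remained % 5)
      have hneg : ¬ (remained - 3 * kk (remained % 5) ≥ 0) := by nlinarith
      rw [dif_neg h, if_neg hneg]

theorem ports_agree (suger : Int) : get_package_count suger = get_package_count_alt suger := by
  unfold get_package_count get_package_count_alt
  have h5 : PySem.Int.mod suger 5 = suger % 5 :=
    PySem.Int.mod_eq_emod_of_pos (by norm_num)
  rw [h5]
  have hb : suger % 5 = 0 ∨ suger % 5 = 1 ∨ suger % 5 = 2 ∨ suger % 5 = 3 ∨ suger % 5 = 4 := by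
    omega
  rcases hb with h0 | h1 | h2 | h3 | h4
  · simp [h0]
  · rw [h1]
    have : PySem.Int.mod 1 3 = 1 := by decide
    rw [this]
    norm_num
    rw [pyLoopA_eq, h1]
    have hk : kk 1 = 2 := by decide
    rw [hk]
    have : suger - (suger - 3 * 2) = 6 := by ring
    rw [this]
    have : PySem.Int.floordiv 6 3 = 2 := by decide
    rw [this]
    norm_num
  · rw [h2]
    have : PySem.Int.mod 2 3 = 2 := by decide
    rw [this]
    norm_num
    rw [pyLoopA_eq, h2]
    have hk : kk 2 = 4 := by decide
    rw [hk]
    have : suger - (suger - 3 * 4) = 12 := by ring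
    rw [this]
    have : PySem.Int.floordiv 12 3 = 4 := by decide
    rw [this]
    norm_num
  · rw [h3]
    have hm : PySem.Int.mod 3 3 = 0 := by decide
    have hd : PySem.Int.floordiv 3 3 = 1 := by decide
    rw [hm, hd]
    norm_num
  · rw [h4]
    have : PySem.Int.mod 4 3 = 1 := by decide
    rw [this]
    norm_num
    rw [pyLoopA_eq, h4]
    have hk : kk 4 = 3 := by decide
    rw [hk]
    have : suger - (suger - 3 * 3) = 9 := by ring
    rw [this]
    have : PySem.Int.floordiv 9 3 = 3 := by decide
    rw [this]
    norm_num

-- ===== VERDICT (by name: the statement is the Claim_ definition above) =====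
theorem get_package_count_spec : Claim_equal_get_package_count := by
  intro suger _
  exact ports_agree suger
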